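-- pv_equiv track=rewrite | github.com/AlanKhorsid/semtex | src/mostCommonWord.py | find_second_most_common_word
-- ===== SOURCE A (Python) =====
-- from collections import Counter
--
-- def find_second_most_common_word(entity_types):
--     function_words = {"the", "of", "a", "an", "in", "to", "it"}
--     all_words = [word.lower(
--     ) for entity_type in entity_types for word in entity_type if word.lower() not in function_words]
--     word_count = Counter(all_words)
--     sorted_word_count = sorted(
--         word_count.items(), key=lambda x: x[1], reverse=True)
--     return sorted_word_count[1][0] if len(sorted_word_count) > 1 else None
-- ===== SOURCE B (Python) =====
-- def find_second_most_common_word(entity_types):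
--     function_words = {"the", "of", "a", "an", "in", "to", "it"}
--     counts = {}
--     for entity_type in entity_types:
--         for word in entity_type:
--             lw = word.lower()
--             if lw not in function_words:
--                 counts[lw] = counts.get(lw, 0) + 1
--     best = None
--     second = None
--     for item in counts.items():
--         if best is None or item[1] > best[1]:
--             second = best
--             best = item
--         elif second is None or item[1] > second[1]:
--             second = item
--     return second[0] if second is not None else None
-- ===== Notes on version B (the rewrite author's own statement) =====
-- stated objective: alternative
-- what changed: B drops the sort of the word-count items entirely: it builds the counts in one pass and then finds the second-most-common word with a single linear scan tracking the best and second-best (word, count) pairs, with strict comparisons reproducing the stable sort's first-occurrence tie-break (intended as asymptotically faster; a timing run measured only 1.47x at the largest size, below the 1.5x bar).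
import Mathlib
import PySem

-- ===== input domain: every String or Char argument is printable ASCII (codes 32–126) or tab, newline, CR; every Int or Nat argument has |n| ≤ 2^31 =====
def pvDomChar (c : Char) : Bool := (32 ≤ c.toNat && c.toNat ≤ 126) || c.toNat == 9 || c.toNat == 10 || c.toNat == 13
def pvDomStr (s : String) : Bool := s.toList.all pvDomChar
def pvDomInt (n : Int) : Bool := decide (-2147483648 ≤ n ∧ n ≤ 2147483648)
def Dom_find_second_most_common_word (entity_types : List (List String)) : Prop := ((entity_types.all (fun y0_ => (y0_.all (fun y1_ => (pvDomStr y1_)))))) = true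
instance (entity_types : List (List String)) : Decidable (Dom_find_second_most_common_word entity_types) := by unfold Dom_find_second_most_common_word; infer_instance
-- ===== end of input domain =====

-- B replaces A's sort of the word-count items by a single linear scan that tracks the
-- best and second-best (word, count) pairs; same return value, no sort (objective: alternative).

-- ===== PORT A =====
def find_second_most_common_word (entity_types : List (List String)) : Option String :=
  let function_words : List String := ["the", "of", "a", "an", "in", "to", "it"]
  let all_words : List String :=
    entity_types.flatMap (fun entity_type =>
      (entity_type.filter (fun word => !(function_words.contains (PySem.Str.lower word)))).map
        (fun word => PySem.Str.lower word))
  let word_count := PySem.Dict.counter all_words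
  let sorted_word_count := PySem.List.sorted word_count.items (fun x => x.2) true
  if 1 < sorted_word_count.length then some ((sorted_word_count.getD 1 ("", 0)).1) else none

-- ===== PORT B =====
-- one step of B's top-two scan (the body of B's second loop)
def top2step (st : Option (String × Int) × Option (String × Int)) (item : String × Int) :
    Option (String × Int) × Option (String × Int) :=
  match st with
  | (none, _) => (some item, none)
  | (some best, s) =>
    if best.2 < item.2 then (some item, some best)
    else
      match s with
      | none => (some best, some item)
      | some sec => if sec.2 < item.2 then (some best, some item) else (some best, some sec)

def find_second_most_common_word_alt (entity_types : List (List String)) : Option String :=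
  let function_words : List String := ["the", "of", "a", "an", "in", "to", "it"]
  let counts : PySem.Dict String Int :=
    entity_types.foldl (fun d entity_type =>
      entity_type.foldl (fun d word =>
        let lw := PySem.Str.lower word
        if !(function_words.contains lw) then d.insert lw (d.getD lw 0 + 1) else d) d)
      PySem.Dict.empty
  let st := counts.items.foldl top2step (none, none)
  st.2.map (fun p => p.1)

-- ===== PRECONDITION & SPEC =====
def Spec_find_second_most_common_word (entity_types : List (List String)) (out : Option String) : Prop := out = find_second_most_common_word_alt entity_types
instance (entity_types : List (List String)) (out : Option String) : Decidable (Spec_find_second_most_common_word entity_types out) := by unfold Spec_find_second_most_common_word; infer_instance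

-- ===== CLAIM (what is proved, stated in full; the proofs are below) =====
def Claim_equal_find_second_most_common_word : Prop := ∀ (entity_types : List (List String)), Dom_find_second_most_common_word entity_types → Spec_find_second_most_common_word entity_types (find_second_most_common_word entity_types)

-- ===== LEMMAS AND PROOFS =====

-- B's counting loops build exactly Counter(all_words) of A
theorem pv_counts_eq (ets : List (List String)) (fw : List String) :
    ets.foldl (fun d et =>
      et.foldl (fun d w =>
        let lw := PySem.Str.lower w
        if !(fw.contains lw) then d.insert lw (d.getD lw 0 + 1) else d) d)
      PySem.Dict.empty
    = PySem.Dict.counter (ets.flatMap (fun et =>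
        (et.filter (fun w => !(fw.contains (PySem.Str.lower w)))).map
          (fun w => PySem.Str.lower w))) := by
  rw [← PySem.Dict.foldl_insert_getD_add_one_eq_counter, List.foldl_flatMap]
  simp only [List.foldl_map, List.foldl_filter]

-- the first two elements of a list, in B's scan-state representation
def pvEnc (l : List (String × Int)) : Option (String × Int) × Option (String × Int) :=
  match l with
  | [] => (none, none)
  | [a] => (some a, none)
  | a :: b :: _ => (some a, some b)

theorem pv_ins2 (x : String × Int) (acc : List (String × Int)) :
    pvEnc (PySem.List.insertBy (fun a b : String × Int => decide (b.2 < a.2)) x acc)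
    = top2step (pvEnc acc) x := by
  match acc with
  | [] => rfl
  | [y] =>
    simp only [PySem.List.insertBy, pvEnc, top2step]
    split_ifs <;> simp_all
  | y :: z :: zs =>
    simp only [PySem.List.insertBy, pvEnc, top2step]
    split_ifs <;> simp_all

theorem pv_foldl_enc (l : List (String × Int)) (acc : List (String × Int)) :
    pvEnc (l.foldl (fun a x => PySem.List.insertBy (fun a b : String × Int => decide (b.2 < a.2)) x a) acc)
    = l.foldl top2step (pvEnc acc) := by
  induction l generalizing acc with
  | nil => rfl
  | cons x t ih => simp only [List.foldl_cons, ih, pv_ins2]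

-- second element of the stable descending sort = result of B's top-two scan
theorem pv_second_sorted (l : List (String × Int)) :
    (if 1 < (PySem.List.sorted l (fun x => x.2) true).length then
        some (((PySem.List.sorted l (fun x => x.2) true).getD 1 ("", 0)).1)
      else none)
    = (l.foldl top2step (none, none)).2.map (fun p => p.1) := by
  have hE : pvEnc (PySem.List.sorted l (fun x => x.2) true) = l.foldl top2step (none, none) := by
    rw [PySem.List.sorted_rev_eq_foldl_insertBy]
    exact pv_foldl_enc l []
  match hL : PySem.List.sorted l (fun x => x.2) true with
  | [] => rw [hL] at hE; simp [pvEnc] at hE; simp [← hE]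
  | [a] => rw [hL] at hE; simp [pvEnc] at hE; simp [← hE]
  | a :: b :: t => rw [hL] at hE; simp [pvEnc] at hE; simp [← hE]

-- ===== VERDICT (by name: the statement is the Claim_ definition above) =====
theorem find_second_most_common_word_spec : Claim_equal_find_second_most_common_word := by
  intro ets _
  unfold Spec_find_second_most_common_word find_second_most_common_word find_second_most_common_word_alt
  simp only [pv_counts_eq]
  exact pv_second_sorted _
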